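-- pv_equiv track=rewrite | github.com/1412270/hrm3 | utils.py | get_conten_at_center
-- ===== SOURCE A (Python) =====
-- def find_index_character_specical(txt):
--     """find index of special character that is not alphabet,space,dot
--             :param txt: a string need seach
--
--             :type txt : string
--
--             :return: index of character or -1 if cannot find
--             """
--     for i, letter in enumerate(txt):
--         if not letter.isalpha() and not letter.isspace() and letter != '.':
--             return i
--     return -1
--
-- def get_conten_at_center(line, index_key, lever=True):
--     """get only conten (group of some special wolds) of string if lead or end of string is special character
--             :param line: a string need process
--             :param index_key: index begin of 'group of some special words'
--             :param lever: option to check all character in word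
--
--             :type line : string
--             :type index_key : int
--             :type lever : bool
--
--             :return: string after processed
--             """
--     # TODO fix while true
--     while True:
--         index = find_index_character_specical(line)
--         if index == -1:
--             break
--         if index < index_key:
--             line = line[index+1:]
--             # while True:
--             #     new_line = line[index:]
--             #     index += 1
--             #     if len(new_line) < 2 or new_line[0].isupper():
--             #         line = new_line
--             #         index_key -= index
--             #         break
--         else:
--             line = line[:index]
--             # if len(line[index:].split()) > 2:
--             #     line = line[0:index]
--             # else:
--             #     line = line.replace(')', '')
--             #     line = line.replace('(', '')
--             #     line = line.replace('-', '')
--             # if lever: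
--             #     words = line.split()
--             #     new_line = ''
--             #     for i in words:
--             #         if i[0].isupper():
--             #             new_line = new_line + ' ' + i
--             #         else:
--             #             line = new_line
--             #             break
--             #     break
--     return line.rstrip().lstrip()
-- ===== SOURCE B (Python) =====
-- def get_conten_at_center(line, index_key, lever=True):
--     """Single left-to-right pass: track the start offset of the kept region,
--     stop at the first special character at/after index_key relative to start."""
--     start = 0
--     for p, ch in enumerate(line):
--         if not ch.isalpha() and not ch.isspace() and ch != '.':
--             if p - start < index_key:
--                 start = p + 1
--             else:
--                 return line[start:p].strip()
--     return line[start:].strip()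
-- ===== Notes on version B (the rewrite author's own statement) =====
-- stated objective: alternative
-- what changed: Replaced A's restart-from-scratch while-loop (each iteration rescans the remaining string for the first special character and reslices it) with a single left-to-right pass that keeps an integer start offset and slices once at the end.
import Mathlib
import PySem

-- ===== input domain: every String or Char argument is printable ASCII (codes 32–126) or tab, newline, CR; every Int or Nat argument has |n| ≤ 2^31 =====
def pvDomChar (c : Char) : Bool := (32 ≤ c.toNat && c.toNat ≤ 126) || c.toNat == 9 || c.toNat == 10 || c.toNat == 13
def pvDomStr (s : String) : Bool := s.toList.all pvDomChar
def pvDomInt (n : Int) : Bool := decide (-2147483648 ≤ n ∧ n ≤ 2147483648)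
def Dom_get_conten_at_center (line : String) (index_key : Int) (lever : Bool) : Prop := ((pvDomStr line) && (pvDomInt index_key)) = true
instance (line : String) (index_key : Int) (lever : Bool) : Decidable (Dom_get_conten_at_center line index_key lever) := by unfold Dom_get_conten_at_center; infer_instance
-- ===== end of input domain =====

-- B replaces A's restart-from-scratch while-loop (rescan + reslice each round) with a
-- single left-to-right pass keeping an integer start offset and slicing once at the end.

-- shared character test: "not letter.isalpha() and not letter.isspace() and letter != '.'"
def pvSpec (c : Char) : Bool := !PySem.Chars.isalpha c && !PySem.Chars.isspace c && !(c == '.')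

-- ===== PORT A =====
def pvFindGo : List Char → Int → Int
  | [], _ => -1
  | c :: t, i => if pvSpec c then i else pvFindGo t (i + 1)

def find_index_character_specical (txt : List Char) : Int := pvFindGo txt 0

-- bounds fact cited by pvALoop's decreasing_by
theorem pvFindGo_bounds (l : List Char) (i : Int) :
    pvFindGo l i = -1 ∨ (i ≤ pvFindGo l i ∧ pvFindGo l i < i + l.length) := by
  induction l generalizing i with
  | nil => exact Or.inl rfl
  | cons c t ih =>
    by_cases h : pvSpec c = true
    · right; simp only [pvFindGo, if_pos h, List.length_cons]; push_cast; omega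
    · have := ih (i + 1)
      simp only [pvFindGo, h, if_false, Bool.false_eq_true] at *
      rcases this with h1 | h1
      · exact Or.inl h1
      · right; simp; omega

theorem pvSliceFrom (l : List Char) (a : Int) (ha : 0 ≤ a) :
    PySem.List.slice l (some a) none = l.drop a.toNat := by
  obtain ⟨k, rfl⟩ := Int.eq_ofNat_of_zero_le ha
  simp [pysem]

theorem pvSliceTo (l : List Char) (b : Int) (hb : 0 ≤ b) :
    PySem.List.slice l none (some b) = l.take b.toNat := by
  obtain ⟨k, rfl⟩ := Int.eq_ofNat_of_zero_le hb
  simp [pysem]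

def pvALoop (line : List Char) (index_key : Int) : List Char :=
  let index := find_index_character_specical line
  if _h1 : index = -1 then line
  else if _h2 : index < index_key then
    pvALoop (PySem.List.slice line (some (index + 1)) none) index_key
  else
    pvALoop (PySem.List.slice line none (some index)) index_key
termination_by line.length
decreasing_by
  · have hb := pvFindGo_bounds line 0
    simp only [find_index_character_specical] at *
    rcases hb with hb | hb
    · exact absurd hb _h1
    · rw [pvSliceFrom line _ (by omega)]
      simp only [List.length_drop]
      omega
  · have hb := pvFindGo_bounds line 0
    simp only [find_index_character_specical] at *
    rcases hb with hb | hb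
    · exact absurd hb _h1
    · rw [pvSliceTo line _ (by omega)]
      simp only [List.length_take]
      omega

def get_conten_at_center (line : String) (index_key : Int) (lever : Bool) : String :=
  String.mk (PySem.Chars.lstrip (PySem.Chars.rstrip (pvALoop line.toList index_key)))

-- ===== PORT B =====
def pvBLoop (line : List Char) (index_key : Int) : List (Int × Char) → Int → List Char
  | [], start => PySem.Chars.strip (PySem.List.slice line (some start) none)
  | (p, ch) :: rest, start =>
    if pvSpec ch then
      if p - start < index_key then pvBLoop line index_key rest (p + 1)
      else PySem.Chars.strip (PySem.List.slice line (some start) (some p))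
    else pvBLoop line index_key rest start

def get_conten_at_center_alt (line : String) (index_key : Int) (lever : Bool) : String :=
  String.mk (pvBLoop line.toList index_key (PySem.List.enumerate line.toList 0) 0)

-- ===== PRECONDITION & SPEC =====
def Spec_get_conten_at_center (line : String) (index_key : Int) (lever : Bool) (out : String) : Prop := out = get_conten_at_center_alt line index_key lever
instance (line : String) (index_key : Int) (lever : Bool) (out : String) : Decidable (Spec_get_conten_at_center line index_key lever out) := by unfold Spec_get_conten_at_center; infer_instance

-- ===== CLAIM (what is proved, stated in full; the proofs are below) =====
def Claim_equal_get_conten_at_center : Prop := ∀ (line : String) (index_key : Int) (lever : Bool), Dom_get_conten_at_center line index_key lever → Spec_get_conten_at_center line index_key lever (get_conten_at_center line index_key lever)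

-- ===== LEMMAS AND PROOFS =====

-- rstrip-then-lstrip equals strip (= lstrip-then-rstrip in PySem)
theorem pvDropWhile_comm (p : Char → Bool) (l : List Char) :
    List.dropWhile p (List.dropWhile p l.reverse).reverse
      = (List.dropWhile p (List.dropWhile p l).reverse).reverse := by
  rcases e : List.dropWhile p l with _ | ⟨c, t⟩
  · have h : ∀ x ∈ l, p x := by
      intro x hx
      exact List.dropWhile_eq_nil_iff.1 e x hx
    have h2 : List.dropWhile p l.reverse = [] :=
      List.dropWhile_eq_nil_iff.2 (fun x hx => h x (List.mem_reverse.1 hx))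
    simp [h2]
  · have hc : p c = false := by
      have := List.head_dropWhile_not p (l := l) (by simp [e])
      simpa [e] using this
    have hl : List.takeWhile p l ++ c :: t = l := by
      rw [← e]; exact List.takeWhile_append_dropWhile
    have hu : ∀ x ∈ List.takeWhile p l, p x := fun x hx => List.mem_takeWhile_imp hx
    have hd : List.dropWhile p (t.reverse ++ [c]) = List.dropWhile p t.reverse ++ [c] := by
      rw [List.dropWhile_append]
      by_cases ht : List.dropWhile p t.reverse = []
      · simp [ht, hc]
      · simp [ht]
    have hrev : l.reverse = (t.reverse ++ [c]) ++ (List.takeWhile p l).reverse := by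
      conv_lhs => rw [← hl]
      simp
    have hne : List.dropWhile p (t.reverse ++ [c]) ≠ [] := by
      rw [hd]; simp
    have h1 : List.dropWhile p l.reverse
        = (List.dropWhile p t.reverse ++ [c]) ++ (List.takeWhile p l).reverse := by
      rw [hrev, List.dropWhile_append]
      simp [hd]
    have hu2 : List.dropWhile p ((List.takeWhile p l) ++ (c :: (List.dropWhile p t.reverse).reverse))
        = c :: (List.dropWhile p t.reverse).reverse := by
      rw [List.dropWhile_append]
      have h3 : List.dropWhile p (List.takeWhile p l) = [] :=
        List.dropWhile_eq_nil_iff.2 hu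
      simp [h3, hc]
    rw [h1]
    simp only [List.reverse_append, List.reverse_cons, List.reverse_reverse,
      List.append_assoc, List.singleton_append]
    rw [hu2]
    simp [hd]

theorem pvStrip_eq (l : List Char) :
    PySem.Chars.lstrip (PySem.Chars.rstrip l) = PySem.Chars.strip l := by
  simp only [PySem.Chars.strip, PySem.Chars.lstrip, PySem.Chars.rstrip]
  exact pvDropWhile_comm _ l

theorem pvSliceBetween (l : List Char) (a b : Nat) :
    PySem.List.slice l (some (a : Int)) (some (b : Int)) = (l.drop a).take (b - a) := by
  simp [pysem]

-- find on an all-clean list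
theorem pvFindGo_clean (l : List Char) (i : Int) (h : ∀ c ∈ l, pvSpec c = false) :
    pvFindGo l i = -1 := by
  induction l generalizing i with
  | nil => rfl
  | cons c t ih =>
    have hc := h c (by simp)
    simp only [pvFindGo, hc, Bool.false_eq_true, if_false]
    exact ih _ (fun x hx => h x (by simp [hx]))

theorem pvALoop_clean (l : List Char) (key : Int) (h : ∀ c ∈ l, pvSpec c = false) :
    pvALoop l key = l := by
  rw [pvALoop]
  simp [find_index_character_specical, pvFindGo_clean l 0 h]

-- find locates the first special index
theorem pvFindGo_first (l : List Char) (i : Int) (k : Nat) (hk : k < l.length)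
    (hpre : ∀ j (hj : j < k), pvSpec (l[j]'(by omega)) = false)
    (hs : pvSpec (l[k]'hk) = true) :
    pvFindGo l i = i + k := by
  induction l generalizing i k with
  | nil => simp at hk
  | cons c t ih =>
    cases k with
    | zero => simp_all [pvFindGo]
    | succ k' =>
      have hc : pvSpec c = false := hpre 0 (by omega)
      simp only [pvFindGo, hc, Bool.false_eq_true, if_false]
      have := ih (i + 1) k' (by simpa using hk)
        (fun j hj => by simpa using hpre (j + 1) (by omega))
        (by simpa using hs)
      rw [this]; push_cast; ring

theorem pvEnumDropHead (l : List Char) (m : Nat) (h : m < l.length) :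
    (PySem.List.enumerate l 0).drop m
      = ((m : Int), l[m]) :: (PySem.List.enumerate l 0).drop (m + 1) := by
  rw [List.drop_eq_getElem_cons (by simp [PySem.List.length_enumerate, h])]
  simp [PySem.List.getElem_enumerate]

-- the core correspondence: B's one pass at (position m, offset s) equals strip of A's loop on the suffix
theorem pvLoop_eq (cs : List Char) (key : Int) :
    ∀ (fuel m s : Nat), cs.length - m ≤ fuel → s ≤ m → m ≤ cs.length →
    (∀ c ∈ (cs.drop s).take (m - s), pvSpec c = false) →
    pvBLoop cs key ((PySem.List.enumerate cs 0).drop m) (s : Int)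
      = PySem.Chars.strip (pvALoop (cs.drop s) key) := by
  intro fuel
  induction fuel with
  | zero =>
    intro m s hf hsm hm hclean
    have hmE : m = cs.length := by omega
    subst hmE
    rw [List.drop_eq_nil_of_le (by simp [PySem.List.length_enumerate])]
    have hdc : ∀ c ∈ cs.drop s, pvSpec c = false := by
      intro c hc
      exact hclean c (by rwa [List.take_of_length_le (by simp)])
    rw [pvALoop_clean _ _ hdc]
    simp only [pvBLoop]
    rw [pvSliceFrom cs _ (by positivity), Int.toNat_natCast]
  | succ fuel ih =>
    intro m s hf hsm hm hclean
    by_cases hmE : m = cs.length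
    · subst hmE
      rw [List.drop_eq_nil_of_le (by simp [PySem.List.length_enumerate])]
      have hdc : ∀ c ∈ cs.drop s, pvSpec c = false := by
        intro c hc
        exact hclean c (by rwa [List.take_of_length_le (by simp)])
      rw [pvALoop_clean _ _ hdc]
      simp only [pvBLoop]
      rw [pvSliceFrom cs _ (by positivity), Int.toNat_natCast]
    · have hmlt : m < cs.length := by omega
      rw [pvEnumDropHead cs m hmlt]
      by_cases hsp : pvSpec (cs[m]'hmlt) = true
      · -- special char at m: A's find on the suffix returns m - s
        have hfind : pvFindGo (cs.drop s) 0 = ((m - s : Nat) : Int) := by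
          have hk : m - s < (cs.drop s).length := by simp; omega
          have := pvFindGo_first (cs.drop s) 0 (m - s) hk
            (fun j hj => by
              have hj2 : j < ((cs.drop s).take (m - s)).length := by simp; omega
              have := hclean (((cs.drop s).take (m - s))[j]'hj2) (List.getElem_mem hj2)
              rwa [List.getElem_take] at this)
            (by
              rw [List.getElem_drop]
              have he : s + (m - s) = m := by omega
              simp only [he]
              exact hsp)
          rw [this]; ring
        have hne : pvFindGo (cs.drop s) 0 ≠ -1 := by rw [hfind]; omega
        have hcast : ((m - s : Nat) : Int) = (m : Int) - (s : Int) := by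
          push_cast [Nat.cast_sub hsm]; ring
        simp only [pvBLoop, hsp, if_true]
        rw [pvALoop]
        simp only [find_index_character_specical, hfind]
        rw [dif_neg (show ¬((m - s : Nat) : Int) = -1 by omega)]
        by_cases hkey : ((m - s : Nat) : Int) < key
        · -- drop the prefix including m, continue
          rw [dif_pos hkey]
          have hb : (m : Int) - (s : Int) < key := by rw [← hcast]; exact hkey
          rw [if_pos hb]
          have hs1 : PySem.List.slice (cs.drop s) (some (((m - s : Nat) : Int) + 1)) none
              = cs.drop (m + 1) := by
            rw [pvSliceFrom _ _ (by positivity)]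
            have ht : ((((m - s : Nat) : Int)) + 1).toNat = (m - s) + 1 := by omega
            rw [ht, List.drop_drop]
            congr 1; omega
          rw [hs1]
          have hmi : ((m : Int) + 1) = (((m + 1 : Nat)) : Int) := by push_cast; ring
          rw [hmi]
          exact ih (m + 1) (m + 1) (by omega) (by omega) (by omega)
            (by simp)
        · -- truncate at m and stop
          rw [dif_neg hkey]
          have hb : ¬ ((m : Int) - (s : Int) < key) := by rw [← hcast]; exact hkey
          rw [if_neg hb]
          have hs2 : PySem.List.slice (cs.drop s) none (some ((m - s : Nat) : Int))
              = (cs.drop s).take (m - s) := by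
            rw [pvSliceTo _ _ (by positivity), Int.toNat_natCast]
          rw [hs2, pvALoop_clean _ _ hclean, pvSliceBetween cs s m]
      · -- non-special char at m: both sides unchanged
        simp only [pvBLoop, hsp, if_false]
        apply ih (m + 1) s (by omega) (by omega) (by omega)
        intro c hc
        have hsucc : (m + 1 - s) = (m - s) + 1 := by omega
        rw [hsucc, List.take_add_one] at hc
        rcases List.mem_append.1 hc with h | h
        · exact hclean c h
        · have hg : (cs.drop s)[m - s]? = some (cs[m]'hmlt) := by
            rw [List.getElem?_drop]
            have he : s + (m - s) = m := by omega
            rw [he, List.getElem?_eq_getElem hmlt]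
          rw [hg] at h
          simp only [Option.toList_some, List.mem_singleton] at h
          subst h
          simpa using hsp

-- ===== VERDICT (by name: the statement is the Claim_ definition above) =====
theorem get_conten_at_center_spec : Claim_equal_get_conten_at_center := by
  intro line key lever _
  unfold Spec_get_conten_at_center get_conten_at_center get_conten_at_center_alt
  rw [pvStrip_eq]
  congr 1
  have := pvLoop_eq line.toList key line.toList.length 0 0 (by omega) (by omega) (by omega)
    (by simp)
  simpa using this.symm
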